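-- pv_equiv track=rewrite | github.com/ikaharudin7/AIPartB | ian/utility.py | num_capture_positions
-- ===== SOURCE A (Python) =====
-- def num_capture_positions(board, size, player, opponent):
--     num = 0
--     for r in range(size):
--         for q in range(size):
--             if (r, q, player) not in board and (r, q, opponent) not in board:
--                 # check if this coordinate can capture
--                 if len(capture(board, (r, q, player))) > 0:
--                     num += 1
--
--     return num
--
-- def capture(board, coord):
--     colour = coord[2]
--     opp = "red"
--     if colour == "red":
--         opp = "blue"
--
--     captured = []
--
--     # Check 6 possible options manually
--     r = coord[0]
--     q = coord[1]
--
--     # Check if it is on the upper and lower segments of diamond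
--     if (r+2, q-1, colour) in board and (r+1, q-1, opp) in board and (r+1, q, opp) in board:
--         captured.append((r+1, q-1, opp))
--         captured.append((r+1, q, opp))
--     if (r+1, q+1, colour) in board and (r+1, q, opp) in board and (r, q+1, opp) in board:
--         captured.append((r+1, q, opp))
--         captured.append((r, q+1, opp))
--     if (r-1, q+2, colour) in board and (r, q+1, opp) in board and (r-1, q+1, opp) in board:
--         captured.append((r, q+1, opp))
--         captured.append((r-1, q+1, opp))
--     if (r-2, q+1, colour) in board and (r-1, q, opp) in board and (r-1, q+1, opp) in board:
--         captured.append((r-1, q, opp))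
--         captured.append((r-1, q+1, opp))
--     if (r-1, q-1, colour) in board and (r, q-1, opp) in board and (r-1, q, opp) in board:
--         captured.append((r, q-1, opp))
--         captured.append((r-1, q, opp))
--     if (r+1, q-2, colour) in board and (r, q-1, opp) in board and (r+1, q-1, opp) in board:
--         captured.append((r, q-1, opp))
--         captured.append((r+1, q-1, opp))
--
--     # Check if inner two have been completed to capture upper segments
--     if (r, q+1, colour) in board and (r+1, q, opp) in board and (r-1, q+1, opp) in board:
--         captured.append((r+1, q, opp))
--         captured.append((r-1, q+1, opp))
--     if (r-1, q+1, colour) in board and (r, q+1, opp) in board and (r-1, q, opp) in board: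
--         captured.append((r, q+1, opp))
--         captured.append((r-1, q, opp))
--     if (r-1, q, colour) in board and (r, q-1, opp) in board and (r-1, q+1, opp) in board:
--         captured.append((r, q-1, opp))
--         captured.append((r-1, q+1, opp))
--     if (r, q-1, colour) in board and (r+1, q-1, opp) in board and (r-1, q, opp) in board:
--         captured.append((r+1, q-1, opp))
--         captured.append((r-1, q, opp))
--     if (r+1, q-1, colour) in board and (r, q-1, opp) in board and (r+1, q, opp) in board:
--         captured.append((r, q-1, opp))
--         captured.append((r+1, q, opp))
--     if (r+1, q, colour) in board and (r, q+1, opp) in board and (r+1, q-1, opp) in board: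
--         captured.append((r, q+1, opp))
--         captured.append((r+1, q-1, opp))
--
--
--     return unique(captured)
--
-- def unique(list):
--
--     unique_list = []
--
--     for x in list:
--         # check if exists in unique_list or not
--         if x not in unique_list:
--             unique_list.append(x)
--
--     return unique_list
-- ===== SOURCE B (Python) =====
-- # B: instead of scanning the whole size x size grid, enumerate only the
-- # deduplicated candidate cells adjacent to opponent-coloured stones and count
-- # those that are empty, on the board and pass a data-driven capture test
-- # (a table of the twelve (own, opp, opp) offset patterns).
--
-- _OFFSETS = ((1, -1), (1, 0), (0, 1), (-1, 0), (-1, 1), (0, -1))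
--
-- _PATTERNS = (
--     ((2, -1), (1, -1), (1, 0)),
--     ((1, 1), (1, 0), (0, 1)),
--     ((-1, 2), (0, 1), (-1, 1)),
--     ((-2, 1), (-1, 0), (-1, 1)),
--     ((-1, -1), (0, -1), (-1, 0)),
--     ((1, -2), (0, -1), (1, -1)),
--     ((0, 1), (1, 0), (-1, 1)),
--     ((-1, 1), (0, 1), (-1, 0)),
--     ((-1, 0), (0, -1), (-1, 1)),
--     ((0, -1), (1, -1), (-1, 0)),
--     ((1, -1), (0, -1), (1, 0)),
--     ((1, 0), (0, 1), (1, -1)),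
-- )
--
-- def _can_capture(bs, r, q, colour, opp):
--     return any(
--         (r + o[0], q + o[1], colour) in bs
--         and (r + p1[0], q + p1[1], opp) in bs
--         and (r + p2[0], q + p2[1], opp) in bs
--         for (o, p1, p2) in _PATTERNS
--     )
--
-- def num_capture_positions(board, size, player, opponent):
--     bs = set(board)
--     opp = "blue" if player == "red" else "red"
--     cands = {(x - dr, y - dq)
--              for (x, y, c) in board if c == opp
--              for (dr, dq) in _OFFSETS}
--     return sum(1 for (r, q) in cands
--                if 0 <= r < size and 0 <= q < size
--                and (r, q, player) not in bs and (r, q, opponent) not in bs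
--                and _can_capture(bs, r, q, player, opp))
-- ===== Notes on version B (the rewrite author's own statement) =====
-- stated objective: faster
-- what changed: Instead of scanning all size*size grid cells and materialising a deduplicated capture list per cell, B builds (as a set comprehension) only the candidate cells adjacent to stones of the capture-opponent colour and counts those passing a table-driven capture test (a 12-entry offset-pattern table queried with any()) against a set of the board.
import Mathlib
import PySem

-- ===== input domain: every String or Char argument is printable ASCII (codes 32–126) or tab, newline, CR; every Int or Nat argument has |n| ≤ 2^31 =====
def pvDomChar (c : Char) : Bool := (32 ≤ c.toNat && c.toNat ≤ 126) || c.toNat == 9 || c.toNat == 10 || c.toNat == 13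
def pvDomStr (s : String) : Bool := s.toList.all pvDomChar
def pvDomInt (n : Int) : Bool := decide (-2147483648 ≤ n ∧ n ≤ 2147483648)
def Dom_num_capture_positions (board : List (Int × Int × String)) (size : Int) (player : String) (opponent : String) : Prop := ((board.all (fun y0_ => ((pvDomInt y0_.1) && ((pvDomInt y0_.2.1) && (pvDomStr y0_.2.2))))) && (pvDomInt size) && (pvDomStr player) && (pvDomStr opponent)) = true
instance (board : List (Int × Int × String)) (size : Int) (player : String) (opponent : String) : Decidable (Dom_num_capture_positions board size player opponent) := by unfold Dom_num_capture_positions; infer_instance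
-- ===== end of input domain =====

-- B replaces A's scan over the whole size×size grid by counting, over the deduplicated
-- candidate cells adjacent to opponent-coloured stones, those passing a table-driven
-- capture test (objective: faster, asymptotic).

-- ===== PORT A =====
-- A's helper 'unique'
def pvUnique (l : List (Int × Int × String)) : List (Int × Int × String) :=
  l.foldl (fun acc x => if acc.contains x then acc else acc ++ [x]) []

-- A's helper 'capture': twelve guarded pairs of appends, then 'unique'
def pvCapture (board : List (Int × Int × String)) (coord : Int × Int × String) :
    List (Int × Int × String) :=
  let colour := coord.2.2
  let opp := if colour == "red" then "blue" else "red"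
  let r := coord.1
  let q := coord.2.1
  let captured : List (Int × Int × String) := []
  let captured := if board.contains (r+2, q-1, colour) && board.contains (r+1, q-1, opp) && board.contains (r+1, q, opp) then captured ++ [(r+1, q-1, opp), (r+1, q, opp)] else captured
  let captured := if board.contains (r+1, q+1, colour) && board.contains (r+1, q, opp) && board.contains (r, q+1, opp) then captured ++ [(r+1, q, opp), (r, q+1, opp)] else captured
  let captured := if board.contains (r-1, q+2, colour) && board.contains (r, q+1, opp) && board.contains (r-1, q+1, opp) then captured ++ [(r, q+1, opp), (r-1, q+1, opp)] else captured
  let captured := if board.contains (r-2, q+1, colour) && board.contains (r-1, q, opp) && board.contains (r-1, q+1, opp) then captured ++ [(r-1, q, opp), (r-1, q+1, opp)] else captured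
  let captured := if board.contains (r-1, q-1, colour) && board.contains (r, q-1, opp) && board.contains (r-1, q, opp) then captured ++ [(r, q-1, opp), (r-1, q, opp)] else captured
  let captured := if board.contains (r+1, q-2, colour) && board.contains (r, q-1, opp) && board.contains (r+1, q-1, opp) then captured ++ [(r, q-1, opp), (r+1, q-1, opp)] else captured
  let captured := if board.contains (r, q+1, colour) && board.contains (r+1, q, opp) && board.contains (r-1, q+1, opp) then captured ++ [(r+1, q, opp), (r-1, q+1, opp)] else captured
  let captured := if board.contains (r-1, q+1, colour) && board.contains (r, q+1, opp) && board.contains (r-1, q, opp) then captured ++ [(r, q+1, opp), (r-1, q, opp)] else captured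
  let captured := if board.contains (r-1, q, colour) && board.contains (r, q-1, opp) && board.contains (r-1, q+1, opp) then captured ++ [(r, q-1, opp), (r-1, q+1, opp)] else captured
  let captured := if board.contains (r, q-1, colour) && board.contains (r+1, q-1, opp) && board.contains (r-1, q, opp) then captured ++ [(r+1, q-1, opp), (r-1, q, opp)] else captured
  let captured := if board.contains (r+1, q-1, colour) && board.contains (r, q-1, opp) && board.contains (r+1, q, opp) then captured ++ [(r, q-1, opp), (r+1, q, opp)] else captured
  let captured := if board.contains (r+1, q, colour) && board.contains (r, q+1, opp) && board.contains (r+1, q-1, opp) then captured ++ [(r, q+1, opp), (r+1, q-1, opp)] else captured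
  pvUnique captured

def num_capture_positions (board : List (Int × Int × String)) (size : Int) (player : String) (opponent : String) : Int :=
  (PySem.List.pyRange 0 size 1).foldl (fun num r =>
    (PySem.List.pyRange 0 size 1).foldl (fun num q =>
      if !board.contains (r, q, player) && !board.contains (r, q, opponent) then
        if 0 < (pvCapture board (r, q, player)).length then num + 1 else num
      else num) num) 0

-- ===== PORT B =====
-- B's tuple of the six capture-relevant neighbour offsets
def pvOffsets : List (Int × Int) := [(1, -1), (1, 0), (0, 1), (-1, 0), (-1, 1), (0, -1)]

-- B's table of the twelve (own, opp, opp) offset patterns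
def pvPatterns : List ((Int × Int) × (Int × Int) × (Int × Int)) :=
  [ ((2, -1), (1, -1), (1, 0)),
    ((1, 1), (1, 0), (0, 1)),
    ((-1, 2), (0, 1), (-1, 1)),
    ((-2, 1), (-1, 0), (-1, 1)),
    ((-1, -1), (0, -1), (-1, 0)),
    ((1, -2), (0, -1), (1, -1)),
    ((0, 1), (1, 0), (-1, 1)),
    ((-1, 1), (0, 1), (-1, 0)),
    ((-1, 0), (0, -1), (-1, 1)),
    ((0, -1), (1, -1), (-1, 0)),
    ((1, -1), (0, -1), (1, 0)),
    ((1, 0), (0, 1), (1, -1)) ]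

-- B's helper '_can_capture': any pattern fully present on the board
def pvCanCapture (bs : List (Int × Int × String)) (r q : Int) (colour opp : String) : Bool :=
  pvPatterns.any (fun p =>
    bs.contains (r + p.1.1, q + p.1.2, colour) &&
    bs.contains (r + p.2.1.1, q + p.2.1.2, opp) &&
    bs.contains (r + p.2.2.1, q + p.2.2.2, opp))

-- B's candidate-cell set comprehension
def pvCands (board : List (Int × Int × String)) (opp : String) : PySem.Set (Int × Int) :=
  PySem.Set.ofList ((board.filter (fun t => t.2.2 == opp)).flatMap
    (fun t => pvOffsets.map (fun d => (t.1 - d.1, t.2.1 - d.2))))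

def num_capture_positions_alt (board : List (Int × Int × String)) (size : Int) (player : String) (opponent : String) : Int :=
  let bs : PySem.Set (Int × Int × String) := PySem.Set.ofList board
  let opp := if player == "red" then "blue" else "red"
  ((pvCands board opp).countP (fun c =>
      decide (0 ≤ c.1) && decide (c.1 < size) && decide (0 ≤ c.2) && decide (c.2 < size)
      && !bs.contains (c.1, c.2, player) && !bs.contains (c.1, c.2, opponent)
      && pvCanCapture bs c.1 c.2 player opp) : Int)

-- ===== PRECONDITION & SPEC =====
def Spec_num_capture_positions (board : List (Int × Int × String)) (size : Int) (player : String) (opponent : String) (out : Int) : Prop := out = num_capture_positions_alt board size player opponent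
instance (board : List (Int × Int × String)) (size : Int) (player : String) (opponent : String) (out : Int) : Decidable (Spec_num_capture_positions board size player opponent out) := by unfold Spec_num_capture_positions; infer_instance

-- ===== CLAIM (what is proved, stated in full; the proofs are below) =====
def Claim_equal_num_capture_positions : Prop := ∀ (board : List (Int × Int × String)) (size : Int) (player : String) (opponent : String), Dom_num_capture_positions board size player opponent → Spec_num_capture_positions board size player opponent (num_capture_positions board size player opponent)

-- ===== LEMMAS AND PROOFS =====

-- proof-side explicit form of the capture test
def pvCanCaptureE (bs : List (Int × Int × String)) (r q : Int) (colour opp : String) : Bool :=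
  (bs.contains (r+2, q-1, colour) && bs.contains (r+1, q-1, opp) && bs.contains (r+1, q, opp)) ||
  (bs.contains (r+1, q+1, colour) && bs.contains (r+1, q, opp) && bs.contains (r, q+1, opp)) ||
  (bs.contains (r-1, q+2, colour) && bs.contains (r, q+1, opp) && bs.contains (r-1, q+1, opp)) ||
  (bs.contains (r-2, q+1, colour) && bs.contains (r-1, q, opp) && bs.contains (r-1, q+1, opp)) ||
  (bs.contains (r-1, q-1, colour) && bs.contains (r, q-1, opp) && bs.contains (r-1, q, opp)) ||
  (bs.contains (r+1, q-2, colour) && bs.contains (r, q-1, opp) && bs.contains (r+1, q-1, opp)) ||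
  (bs.contains (r, q+1, colour) && bs.contains (r+1, q, opp) && bs.contains (r-1, q+1, opp)) ||
  (bs.contains (r-1, q+1, colour) && bs.contains (r, q+1, opp) && bs.contains (r-1, q, opp)) ||
  (bs.contains (r-1, q, colour) && bs.contains (r, q-1, opp) && bs.contains (r-1, q+1, opp)) ||
  (bs.contains (r, q-1, colour) && bs.contains (r+1, q-1, opp) && bs.contains (r-1, q, opp)) ||
  (bs.contains (r+1, q-1, colour) && bs.contains (r, q-1, opp) && bs.contains (r+1, q, opp)) ||
  (bs.contains (r+1, q, colour) && bs.contains (r, q+1, opp) && bs.contains (r+1, q-1, opp))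

lemma pvCanCapture_eq (bs : List (Int × Int × String)) (r q : Int) (colour opp : String) :
    pvCanCapture bs r q colour opp = pvCanCaptureE bs r q colour opp := by
  simp only [pvCanCapture, pvPatterns, List.any_cons, List.any_nil, Bool.or_false,
    pvCanCaptureE, sub_eq_add_neg]
  norm_num [Bool.or_assoc]

-- the twelve (guard, appended pair) steps of A's 'capture', as a list
def pvCondList (board : List (Int × Int × String)) (colour opp : String) (r q : Int) :
    List (Bool × List (Int × Int × String)) :=
  [ (board.contains (r+2, q-1, colour) && board.contains (r+1, q-1, opp) && board.contains (r+1, q, opp), [(r+1, q-1, opp), (r+1, q, opp)]),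
    (board.contains (r+1, q+1, colour) && board.contains (r+1, q, opp) && board.contains (r, q+1, opp), [(r+1, q, opp), (r, q+1, opp)]),
    (board.contains (r-1, q+2, colour) && board.contains (r, q+1, opp) && board.contains (r-1, q+1, opp), [(r, q+1, opp), (r-1, q+1, opp)]),
    (board.contains (r-2, q+1, colour) && board.contains (r-1, q, opp) && board.contains (r-1, q+1, opp), [(r-1, q, opp), (r-1, q+1, opp)]),
    (board.contains (r-1, q-1, colour) && board.contains (r, q-1, opp) && board.contains (r-1, q, opp), [(r, q-1, opp), (r-1, q, opp)]),
    (board.contains (r+1, q-2, colour) && board.contains (r, q-1, opp) && board.contains (r+1, q-1, opp), [(r, q-1, opp), (r+1, q-1, opp)]),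
    (board.contains (r, q+1, colour) && board.contains (r+1, q, opp) && board.contains (r-1, q+1, opp), [(r+1, q, opp), (r-1, q+1, opp)]),
    (board.contains (r-1, q+1, colour) && board.contains (r, q+1, opp) && board.contains (r-1, q, opp), [(r, q+1, opp), (r-1, q, opp)]),
    (board.contains (r-1, q, colour) && board.contains (r, q-1, opp) && board.contains (r-1, q+1, opp), [(r, q-1, opp), (r-1, q+1, opp)]),
    (board.contains (r, q-1, colour) && board.contains (r+1, q-1, opp) && board.contains (r-1, q, opp), [(r+1, q-1, opp), (r-1, q, opp)]),
    (board.contains (r+1, q-1, colour) && board.contains (r, q-1, opp) && board.contains (r+1, q, opp), [(r, q-1, opp), (r+1, q, opp)]),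
    (board.contains (r+1, q, colour) && board.contains (r, q+1, opp) && board.contains (r+1, q-1, opp), [(r, q+1, opp), (r+1, q-1, opp)]) ]

lemma pvCapture_eq_fold (board : List (Int × Int × String)) (r q : Int) (colour : String) :
    pvCapture board (r, q, colour) =
    pvUnique ((pvCondList board colour (if colour == "red" then "blue" else "red") r q).foldl
      (fun a p => if p.1 then a ++ p.2 else a) []) := rfl

lemma foldl_guard_append_eq_nil {α : Type} (ps : List (Bool × List α)) (acc : List α) :
    (ps.foldl (fun a p => if p.1 then a ++ p.2 else a) acc = [] ↔
      acc = [] ∧ ∀ p ∈ ps, p.1 = true → p.2 = []) := by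
  induction ps generalizing acc with
  | nil => simp
  | cons p ps ih =>
    rw [List.foldl_cons, ih]
    cases hp : p.1 <;> simp [hp] <;> tauto

lemma pvUnique_step_ne_nil (l : List (Int × Int × String)) (acc : List (Int × Int × String))
    (h : acc ≠ []) :
    l.foldl (fun acc x => if acc.contains x then acc else acc ++ [x]) acc ≠ [] := by
  induction l generalizing acc with
  | nil => simpa
  | cons x xs ih =>
    rw [List.foldl_cons]
    apply ih
    split <;> simp_all

lemma pvUnique_eq_nil_iff (l : List (Int × Int × String)) : pvUnique l = [] ↔ l = [] := by
  cases l with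
  | nil => simp [pvUnique]
  | cons x xs =>
    simp only [pvUnique, List.foldl_cons]
    constructor
    · intro h
      exact absurd h (pvUnique_step_ne_nil xs _ (by simp))
    · intro h; cases h

lemma pvCapture_pos_iff (board : List (Int × Int × String)) (r q : Int) (colour : String) :
    0 < (pvCapture board (r, q, colour)).length ↔
    pvCanCaptureE board r q colour (if colour == "red" then "blue" else "red") = true := by
  rw [pvCapture_eq_fold, List.length_pos_iff, ne_eq, pvUnique_eq_nil_iff,
    foldl_guard_append_eq_nil]
  simp only [pvCondList, pvCanCaptureE, List.forall_mem_cons,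
    List.cons_ne_nil, imp_false, true_and, Bool.or_eq_true]
  tauto

lemma pvCanCaptureE_ofList (board : List (Int × Int × String)) (r q : Int) (colour opp : String) :
    pvCanCaptureE (PySem.Set.ofList board) r q colour opp = pvCanCaptureE board r q colour opp := by
  simp only [pvCanCaptureE, List.contains_eq_mem, PySem.Set.mem_ofList]

lemma mem_pvCands (board : List (Int × Int × String)) (opp : String) (c : Int × Int) :
    c ∈ pvCands board opp ↔
      ∃ t ∈ board, t.2.2 = opp ∧ ∃ d ∈ pvOffsets, c = (t.1 - d.1, t.2.1 - d.2) := by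
  simp only [pvCands, PySem.Set.mem_ofList, List.mem_flatMap, List.mem_filter,
    List.mem_map, beq_iff_eq]
  constructor
  · rintro ⟨t, ⟨ht, hop⟩, d, hd, rfl⟩
    exact ⟨t, ht, hop, d, hd, rfl⟩
  · rintro ⟨t, ht, hop, d, hd, rfl⟩
    exact ⟨t, ⟨ht, hop⟩, d, hd, rfl⟩

lemma nodup_pvCands (board : List (Int × Int × String)) (opp : String) :
    (pvCands board opp).Nodup :=
  PySem.Set.nodup_ofList _

lemma mem_of_contains (board : List (Int × Int × String)) (x : Int × Int × String)
    (h : board.contains x = true) : x ∈ board := by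
  simpa [List.contains_eq_mem] using h

lemma cand_of_canCapture (board : List (Int × Int × String)) (opp : String) (r q : Int)
    (colour : String) (h : pvCanCaptureE board r q colour opp = true) :
    (r, q) ∈ pvCands board opp := by
  rw [mem_pvCands]
  simp only [pvCanCaptureE, Bool.or_eq_true, Bool.and_eq_true, or_assoc] at h
  rcases h with h|h|h|h|h|h|h|h|h|h|h|h <;>
    [ exact ⟨_, mem_of_contains _ _ h.1.2, rfl, (1, -1), by simp [pvOffsets], by simp⟩;
      exact ⟨_, mem_of_contains _ _ h.1.2, rfl, (1, 0), by simp [pvOffsets], by simp⟩;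
      exact ⟨_, mem_of_contains _ _ h.1.2, rfl, (0, 1), by simp [pvOffsets], by simp⟩;
      exact ⟨_, mem_of_contains _ _ h.1.2, rfl, (-1, 0), by simp [pvOffsets], by simp⟩;
      exact ⟨_, mem_of_contains _ _ h.1.2, rfl, (0, -1), by simp [pvOffsets], by simp⟩;
      exact ⟨_, mem_of_contains _ _ h.1.2, rfl, (0, -1), by simp [pvOffsets], by simp⟩;
      exact ⟨_, mem_of_contains _ _ h.1.2, rfl, (1, 0), by simp [pvOffsets], by simp⟩;
      exact ⟨_, mem_of_contains _ _ h.1.2, rfl, (0, 1), by simp [pvOffsets], by simp⟩;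
      exact ⟨_, mem_of_contains _ _ h.1.2, rfl, (0, -1), by simp [pvOffsets], by simp⟩;
      exact ⟨_, mem_of_contains _ _ h.1.2, rfl, (1, -1), by simp [pvOffsets], by simp⟩;
      exact ⟨_, mem_of_contains _ _ h.1.2, rfl, (0, -1), by simp [pvOffsets], by simp⟩;
      exact ⟨_, mem_of_contains _ _ h.1.2, rfl, (0, 1), by simp [pvOffsets], by simp⟩ ]

-- the grid A scans, as a flat list of cells
def pvGrid (size : Int) : List (Int × Int) :=
  (PySem.List.pyRange 0 size 1).flatMap (fun r => (PySem.List.pyRange 0 size 1).map (fun q => (r, q)))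

lemma pyRange_zero_eq (size : Int) :
    PySem.List.pyRange 0 size 1 = (List.range size.toNat).map (fun i : Nat => (i : Int)) := by
  by_cases h : 0 ≤ size
  · obtain ⟨n, rfl⟩ : ∃ n : Nat, size = (n : Int) := ⟨size.toNat, (Int.toNat_of_nonneg h).symm⟩
    rw [Int.toNat_natCast]
    exact PySem.List.pyRange_zero_natCast n
  · have h1 : PySem.List.pyRange 0 size 1 = [] := by
      rw [List.eq_nil_iff_forall_not_mem]
      intro x hx
      rw [PySem.List.mem_pyRange_one] at hx
      omega
    have h2 : size.toNat = 0 := by omega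
    simp [h1, h2]

lemma mem_pvGrid (size : Int) (c : Int × Int) :
    c ∈ pvGrid size ↔ 0 ≤ c.1 ∧ c.1 < size ∧ 0 ≤ c.2 ∧ c.2 < size := by
  simp only [pvGrid, List.mem_flatMap, List.mem_map, PySem.List.mem_pyRange_one]
  constructor
  · rintro ⟨r, hr, q, hq, rfl⟩
    exact ⟨hr.1, hr.2, hq.1, hq.2⟩
  · rintro ⟨h1, h2, h3, h4⟩
    exact ⟨c.1, ⟨h1, h2⟩, c.2, ⟨h3, h4⟩, rfl⟩

lemma nodup_pyRange_zero (size : Int) : (PySem.List.pyRange 0 size 1).Nodup := by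
  rw [pyRange_zero_eq]
  exact List.Nodup.map (fun a b h => by exact_mod_cast h) List.nodup_range

lemma nodup_pvGrid (size : Int) : (pvGrid size).Nodup := by
  rw [pvGrid, List.nodup_flatMap]
  refine ⟨fun r _ => List.Nodup.map (fun a b h => (Prod.ext_iff.mp h).2) (nodup_pyRange_zero size), ?_⟩
  refine (nodup_pyRange_zero size).imp ?_
  intro r1 r2 hne
  intro x hx1 hx2
  simp only [List.mem_map] at hx1 hx2
  obtain ⟨q1, -, rfl⟩ := hx1
  obtain ⟨q2, -, h⟩ := hx2
  exact hne ((Prod.ext_iff.mp h).1).symm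

lemma countP_flatMap {α β : Type} (l : List α) (f : α → List β) (p : β → Bool) :
    (l.flatMap f).countP p = (l.map (fun a => (f a).countP p)).sum := by
  induction l with
  | nil => simp
  | cons x xs ih => simp [List.flatMap_cons, List.countP_append, ih]

lemma sum_map_natCast {α : Type} (l : List α) (f : α → Nat) :
    (l.map (fun a => ((f a : Nat) : Int))).sum = ((l.map f).sum : Int) := by
  induction l with
  | nil => simp
  | cons x xs ih => simp [ih]

-- the combined per-cell test of A, as one boolean on cells
def pvTest (board : List (Int × Int × String)) (player opponent : String) (c : Int × Int) : Bool :=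
  (!board.contains (c.1, c.2, player) && !board.contains (c.1, c.2, opponent)) &&
    pvCanCaptureE board c.1 c.2 player (if player == "red" then "blue" else "red")

lemma portA_eq_countP (board : List (Int × Int × String)) (size : Int) (player opponent : String) :
    num_capture_positions board size player opponent =
      ((pvGrid size).countP (pvTest board player opponent) : Int) := by
  unfold num_capture_positions
  have hinner : ∀ (num r : Int),
      (PySem.List.pyRange 0 size 1).foldl (fun num q =>
        if !board.contains (r, q, player) && !board.contains (r, q, opponent) then
          if 0 < (pvCapture board (r, q, player)).length then num + 1 else num
        else num) num
      = num + ((PySem.List.pyRange 0 size 1).countP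
          (fun q => pvTest board player opponent (r, q)) : Int) := by
    intro num r
    rw [PySem.List.foldl_congr_mem _ _
      (fun acc q => if pvTest board player opponent (r, q) then acc + 1 else acc) _ ?_]
    · exact PySem.List.foldl_if_add_one _ _ _
    · intro acc q _
      dsimp only
      have ht : pvTest board player opponent (r, q) =
          ((!board.contains (r, q, player) && !board.contains (r, q, opponent)) &&
            pvCanCaptureE board r q player (if player == "red" then "blue" else "red")) := rfl
      by_cases he : (!board.contains (r, q, player) && !board.contains (r, q, opponent)) = true
      · rw [if_pos he]
        by_cases hc : 0 < (pvCapture board (r, q, player)).length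
        · have hcc := (pvCapture_pos_iff board r q player).mp hc
          rw [if_pos hc, ht, he, hcc, Bool.true_and, if_pos rfl]
        · have hcc : pvCanCaptureE board r q player (if player == "red" then "blue" else "red") = false := by
            rcases Bool.eq_false_or_eq_true (pvCanCaptureE board r q player (if player == "red" then "blue" else "red")) with h0 | h0
            · exact absurd ((pvCapture_pos_iff board r q player).mpr h0) hc
            · exact h0
          rw [if_neg hc, ht, he, hcc, Bool.true_and, if_neg (by simp)]
      · have he' : (!board.contains (r, q, player) && !board.contains (r, q, opponent)) = false := by
          rcases Bool.eq_false_or_eq_true (!board.contains (r, q, player) && !board.contains (r, q, opponent)) with h0 | h0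
          · exact absurd h0 he
          · exact h0
        rw [if_neg he, ht, he', Bool.false_and, if_neg (by simp)]
  rw [PySem.List.foldl_congr_mem _ _
    (fun num r => num + ((PySem.List.pyRange 0 size 1).countP
      (fun q => pvTest board player opponent (r, q)) : Int)) _
    (fun acc r _ => hinner acc r)]
  rw [PySem.List.foldl_add]
  rw [sum_map_natCast (f := fun r => (PySem.List.pyRange 0 size 1).countP
    (fun q => pvTest board player opponent (r, q)))]
  rw [pvGrid, countP_flatMap]
  simp only [List.countP_map, Function.comp_def, zero_add]

lemma portB_eq_countP (board : List (Int × Int × String)) (size : Int) (player opponent : String) :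
    num_capture_positions_alt board size player opponent =
      (((pvCands board (if player == "red" then "blue" else "red")).countP
        (fun c => (decide (0 ≤ c.1) && decide (c.1 < size) && decide (0 ≤ c.2) && decide (c.2 < size)) &&
          pvTest board player opponent c)) : Int) := by
  unfold num_capture_positions_alt
  dsimp only
  congr 1
  apply List.countP_congr
  intro c _
  simp only [pvTest, pvCanCapture_eq, pvCanCaptureE_ofList, PySem.Set.contains_eq_listContains,
    List.contains_eq_mem, PySem.Set.mem_ofList, Bool.and_assoc]

lemma counts_agree (board : List (Int × Int × String)) (size : Int) (player opponent : String) :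
    (pvGrid size).countP (pvTest board player opponent) =
      (pvCands board (if player == "red" then "blue" else "red")).countP
        (fun c => (decide (0 ≤ c.1) && decide (c.1 < size) && decide (0 ≤ c.2) && decide (c.2 < size)) &&
          pvTest board player opponent c) := by
  rw [List.countP_eq_length_filter, List.countP_eq_length_filter]
  apply List.Perm.length_eq
  rw [List.perm_ext_iff_of_nodup ((nodup_pvGrid size).filter _)
    ((nodup_pvCands board _).filter _)]
  intro c
  simp only [List.mem_filter, mem_pvGrid, Bool.and_eq_true, decide_eq_true_eq]
  constructor
  · rintro ⟨⟨h1, h2, h3, h4⟩, hP⟩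
    have hcan : pvCanCaptureE board c.1 c.2 player (if player == "red" then "blue" else "red") = true := by
      have h' := hP
      simp only [pvTest, Bool.and_eq_true] at h'
      exact h'.2
    refine ⟨?_, ⟨⟨⟨h1, h2⟩, h3⟩, h4⟩, hP⟩
    have := cand_of_canCapture board _ c.1 c.2 player hcan
    simpa using this
  · rintro ⟨-, ⟨⟨⟨h1, h2⟩, h3⟩, h4⟩, hP⟩
    exact ⟨⟨h1, h2, h3, h4⟩, hP⟩

-- ===== VERDICT (by name: the statement is the Claim_ definition above) =====
theorem num_capture_positions_spec : Claim_equal_num_capture_positions := by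
  intro board size player opponent _
  unfold Spec_num_capture_positions
  rw [portA_eq_countP, portB_eq_countP, counts_agree]
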